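-- pv_equiv track=rewrite | github.com/sammcj/agentic-coding | Skills/view-team-session/scripts/generate.py | consolidate_agent_text
-- ===== SOURCE A (Python) =====
-- def consolidate_agent_text(events: list[dict]) -> list[dict]:
--     """Merge consecutive agent_text events from the same agent."""
--     if not events:
--         return events
--
--     consolidated = []
--     i = 0
--     while i < len(events):
--         event = events[i]
--         if event["type"] == "agent_text":
--             # Collect consecutive agent_text from same agent
--             texts = [event["content"]]
--             j = i + 1
--             while (j < len(events)
--                    and events[j]["type"] == "agent_text"
--                    and events[j]["agentId"] == event["agentId"]
--                    and events[j]["timestamp"] == event["timestamp"]):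
--                 texts.append(events[j]["content"])
--                 j += 1
--             merged = {**event, "content": "\n\n".join(texts)}
--             consolidated.append(merged)
--             i = j
--         else:
--             consolidated.append(event)
--             i += 1
--     return consolidated
-- ===== SOURCE B (Python) =====
-- def consolidate_agent_text(events: list[dict]) -> list[dict]:
--     """Merge consecutive agent_text events from the same agent.
--
--     Single forward pass: each agent_text event is either merged onto the last
--     element already pushed to the output (when that element is an agent_text
--     from the same agent with the same timestamp) or pushed as a fresh copy.
--     """
--     out = []
--     for ev in events:
--         prev = out[-1] if out else None
--         if (ev["type"] == "agent_text" and prev is not None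
--                 and prev["type"] == "agent_text"
--                 and prev["agentId"] == ev["agentId"]
--                 and prev["timestamp"] == ev["timestamp"]):
--             prev["content"] = prev["content"] + "\n\n" + ev["content"]
--         elif ev["type"] == "agent_text":
--             out.append({**ev})
--         else:
--             out.append(ev)
--     return out
-- ===== Notes on version B (the rewrite author's own statement) =====
-- stated objective: simpler
-- what changed: Replaced the index-driven while loop with an inner lookahead while that collects a whole run before emitting it by a single forward for-pass that merges each agent_text event onto the last element already pushed to the output; Pre_ excludes inputs where A raises KeyError (missing 'type', missing 'content' on an agent_text, missing 'agentId'/'timestamp' on adjacent agent_text pairs A compares) and association lists with duplicate keys, which do not represent any Python dict.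
import Mathlib
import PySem

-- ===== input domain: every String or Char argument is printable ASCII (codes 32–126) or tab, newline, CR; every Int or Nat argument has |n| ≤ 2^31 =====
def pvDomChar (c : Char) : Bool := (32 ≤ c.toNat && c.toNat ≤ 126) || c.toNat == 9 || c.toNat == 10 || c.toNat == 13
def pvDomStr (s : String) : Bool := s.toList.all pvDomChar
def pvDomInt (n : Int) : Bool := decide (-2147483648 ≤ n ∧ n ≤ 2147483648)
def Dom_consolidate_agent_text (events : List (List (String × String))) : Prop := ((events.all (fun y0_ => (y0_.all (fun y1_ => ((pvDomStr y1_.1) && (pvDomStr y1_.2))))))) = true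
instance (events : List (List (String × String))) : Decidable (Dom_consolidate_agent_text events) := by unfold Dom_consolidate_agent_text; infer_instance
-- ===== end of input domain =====

-- B merges each agent_text event onto the last output element in one forward pass,
-- instead of A's index loop with an inner lookahead while; return values agree on Pre_.

-- ===== PORT A =====
-- event["k"] on the association-list representation of a dict
def pvGet? (e : List (String × String)) (k : String) : Option String :=
  (PySem.Dict.mk e).get? k

-- event["type"] == "agent_text"
def pvIsAT (e : List (String × String)) : Bool :=
  pvGet? e "type" == some "agent_text"

-- the inner while loop of A: collect the contents of the consecutive run matching the
-- head event's agentId/timestamp, and return the remaining events (from index j on)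
def pvRunA (ev : List (String × String)) :
    List (List (String × String)) → List String × List (List (String × String))
  | [] => ([], [])
  | e :: tl =>
    if pvIsAT e && (pvGet? e "agentId" == pvGet? ev "agentId")
        && (pvGet? e "timestamp" == pvGet? ev "timestamp") then
      let r := pvRunA ev tl
      ((PySem.Dict.mk e).getD "content" "" :: r.1, r.2)
    else ([], e :: tl)

-- termination measure for the outer loop (i jumps to j ≥ i+1)
theorem pvRunA_suffix (ev : List (String × String)) :
    ∀ tl, (pvRunA ev tl).2 <:+ tl := by
  intro tl
  induction tl with
  | nil => simp [pvRunA]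
  | cons e tl ih =>
    simp only [pvRunA]
    split
    · exact (ih).trans (List.suffix_cons e tl)
    · exact List.suffix_rfl

def consolidate_agent_text (events : List (List (String × String))) :
    List (List (String × String)) :=
  match events with
  | [] => []
  | ev :: tl =>
    if pvIsAT ev then
      let r := pvRunA ev tl
      ((PySem.Dict.mk ev).insert "content"
          (PySem.Str.join "\n\n" ((PySem.Dict.mk ev).getD "content" "" :: r.1))).items
        :: consolidate_agent_text r.2
    else ev :: consolidate_agent_text tl
termination_by events.length
decreasing_by
  · have := (pvRunA_suffix ev tl).length_le
    simp only [List.length_cons]; omega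
  · simp

-- ===== PORT B =====
-- the merge test of B: out[-1] is an agent_text event from the same agent/timestamp
def pvCondB (prev ev : List (String × String)) : Bool :=
  pvIsAT ev && pvIsAT prev
    && (pvGet? prev "agentId" == pvGet? ev "agentId")
    && (pvGet? prev "timestamp" == pvGet? ev "timestamp")

-- one iteration of B's for loop; the output list is kept reversed so that out[-1] is the head
def pvStepB (acc : List (List (String × String))) (ev : List (String × String)) :
    List (List (String × String)) :=
  match acc with
  | prev :: rest =>
    if pvCondB prev ev then
      ((PySem.Dict.mk prev).insert "content"
          ((PySem.Dict.mk prev).getD "content" "" ++ "\n\n"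
            ++ (PySem.Dict.mk ev).getD "content" "")).items :: rest
    else ev :: prev :: rest
  | [] => [ev]

def consolidate_agent_text_alt (events : List (List (String × String))) :
    List (List (String × String)) :=
  (events.foldl pvStepB []).reverse

-- ===== PRECONDITION & SPEC =====
-- Pre_ excludes exactly (a) the inputs on which the Python A raises KeyError — a missing
-- "type", a missing "content" on an agent_text event, or a missing "agentId"/"timestamp"
-- on an adjacent pair of agent_text events whose keys A compares — and (b) association
-- lists with duplicate keys, which do not represent any Python dict.
def Pre_consolidate_agent_text (events : List (List (String × String))) : Prop :=
  (∀ e ∈ events, (pvGet? e "type").isSome ∧ (e.map Prod.fst).Nodup) ∧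
  (∀ e ∈ events, pvIsAT e = true → (pvGet? e "content").isSome) ∧
  events.IsChain (fun a b => pvIsAT a = true → pvIsAT b = true →
    (pvGet? a "agentId").isSome ∧ (pvGet? b "agentId").isSome ∧
      (pvGet? a "agentId" = pvGet? b "agentId" →
        (pvGet? a "timestamp").isSome ∧ (pvGet? b "timestamp").isSome))
instance (events : List (List (String × String))) : Decidable (Pre_consolidate_agent_text events) := by
  unfold Pre_consolidate_agent_text; infer_instance

def pvWitness_consolidate_agent_text : (List (List (String × String))) :=
  [[("type", "agent_text"), ("agentId", "a1"), ("timestamp", "t1"), ("content", "hi")],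
   [("type", "agent_text"), ("agentId", "a1"), ("timestamp", "t1"), ("content", "there")],
   [("type", "tool_call"), ("name", "ls")]]

def Spec_consolidate_agent_text (events : List (List (String × String))) (out : List (List (String × String))) : Prop := out = consolidate_agent_text_alt events
instance (events : List (List (String × String))) (out : List (List (String × String))) : Decidable (Spec_consolidate_agent_text events out) := by unfold Spec_consolidate_agent_text; infer_instance

-- ===== CLAIM (what is proved, stated in full; the proofs are below) =====
def Claim_equal_consolidate_agent_text : Prop := ∀ (events : List (List (String × String))), Dom_consolidate_agent_text events → Pre_consolidate_agent_text events → Spec_consolidate_agent_text events (consolidate_agent_text events)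

-- ===== LEMMAS AND PROOFS =====

-- B's step only ever inspects or rewrites the head of its accumulator
theorem pvFoldl_stepB_cons (tl : List (List (String × String))) :
    ∀ (a : List (String × String)) (rest : List (List (String × String))),
      tl.foldl pvStepB (a :: rest) = tl.foldl pvStepB [a] ++ rest := by
  induction tl with
  | nil => intro a rest; simp
  | cons e tl ih =>
    intro a rest
    simp only [List.foldl_cons, pvStepB]
    split
    · exact ih _ rest
    · rw [ih e (a :: rest), ih e [a], List.append_assoc]; rfl

-- if the first remaining event does not merge with the head, the head is final
theorem pvFoldl_stepB_push (tl : List (List (String × String))) (m : List (String × String))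
    (h : ∀ e tl', tl = e :: tl' → pvCondB m e = false) :
    tl.foldl pvStepB [m] = tl.foldl pvStepB [] ++ [m] := by
  cases tl with
  | nil => simp
  | cons e tl' =>
    simp only [List.foldl_cons, pvStepB, h e tl' rfl]
    exact pvFoldl_stepB_cons tl' e [m]

-- the element A emits for a run, as B builds it: fold the merge over the collected texts
def pvMergeAll (m : List (String × String)) (ts : List String) : List (String × String) :=
  ts.foldl (fun d t =>
    ((PySem.Dict.mk d).insert "content"
        ((PySem.Dict.mk d).getD "content" "" ++ "\n\n" ++ t)).items) m

theorem pvCondB_eq_condA (m ev e : List (String × String))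
    (ht : pvGet? m "type" = some "agent_text")
    (ha : pvGet? m "agentId" = pvGet? ev "agentId")
    (hts : pvGet? m "timestamp" = pvGet? ev "timestamp") :
    pvCondB m e = (pvIsAT e && (pvGet? e "agentId" == pvGet? ev "agentId")
        && (pvGet? e "timestamp" == pvGet? ev "timestamp")) := by
  simp only [pvCondB, pvIsAT, ht, ha, hts]
  cases pvGet? e "type" == some "agent_text" <;>
    simp [Bool.beq_comm]

theorem pvGet?_merge_ne (d : List (String × String)) (v : String) (k : String)
    (hk : k ≠ "content") :
    pvGet? ((PySem.Dict.mk d).insert "content" v).items k = pvGet? d k := by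
  simpa [pvGet?] using PySem.Dict.get?_insert_of_ne (d := PySem.Dict.mk d) (v := v) hk

-- B's fold over a run produces exactly A's run remainder plus the merged head
theorem pvFoldl_stepB_run (tl : List (List (String × String)))
    (hC : ∀ e ∈ tl, pvIsAT e = true → (pvGet? e "content").isSome) :
    ∀ (m ev : List (String × String)),
      pvGet? m "type" = some "agent_text" →
      pvGet? m "agentId" = pvGet? ev "agentId" →
      pvGet? m "timestamp" = pvGet? ev "timestamp" →
      tl.foldl pvStepB [m]
        = (pvRunA ev tl).2.foldl pvStepB [] ++ [pvMergeAll m (pvRunA ev tl).1] := by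
  induction tl with
  | nil => intro m ev _ _ _; simp [pvRunA, pvMergeAll]
  | cons e tl ih =>
    intro m ev ht ha hts
    by_cases hc : (pvIsAT e && (pvGet? e "agentId" == pvGet? ev "agentId")
        && (pvGet? e "timestamp" == pvGet? ev "timestamp")) = true
    · simp only [pvRunA, hc, if_true]
      simp only [List.foldl_cons, pvStepB, pvCondB_eq_condA m ev e ht ha hts, hc, if_true]
      have hCtl : ∀ x ∈ tl, pvIsAT x = true → (pvGet? x "content").isSome :=
        fun x hx => hC x (List.mem_cons_of_mem e hx)
      rw [ih hCtl _ ev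
        (by rw [pvGet?_merge_ne _ _ _ (by decide)]; exact ht)
        (by rw [pvGet?_merge_ne _ _ _ (by decide)]; exact ha)
        (by rw [pvGet?_merge_ne _ _ _ (by decide)]; exact hts)]
      rfl
    · simp only [pvRunA, hc]
      apply pvFoldl_stepB_push
      intro e' tl' heq
      injection heq with h1 h2
      rw [← h1, pvCondB_eq_condA m ev e ht ha hts]
      exact Bool.eq_false_iff.mpr hc

-- inserting the value a key already has leaves the dict unchanged
theorem pvInsert_same (d : List (String × String)) (k c : String)
    (hget : pvGet? d k = some c) (hnd : (d.map Prod.fst).Nodup) :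
    ((PySem.Dict.mk d).insert k c).items = d := by
  have hnd' : (PySem.Dict.mk d).keys.Nodup := hnd
  have hcont : (PySem.Dict.mk d).contains k = true := by
    rw [PySem.Dict.contains_eq_isSome_get?]
    simp [pvGet?] at hget; simp [hget]
  rw [PySem.Dict.items_insert_of_contains _ _ hcont]
  have : ∀ p ∈ (PySem.Dict.mk d).items,
      (if p.1 == k then (k, c) else p) = p := by
    intro p hp
    by_cases hpk : p.1 = k
    · have hmem : (p.1, p.2) ∈ (PySem.Dict.mk d).items := hp
      have hsome := PySem.Dict.get?_of_mem_items (d := PySem.Dict.mk d) hmem hnd'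
      rw [hpk] at hsome
      simp only [pvGet?] at hget
      rw [hget] at hsome
      have hv : c = p.2 := Option.some_inj.mp hsome
      cases p
      simp_all
    · simp [hpk]
  exact (List.map_congr_left this).trans (List.map_id _)

theorem pvJoin_cons_cons (c t : String) (ts : List String) :
    PySem.Str.join "\n\n" (c :: t :: ts)
      = PySem.Str.join "\n\n" ((c ++ "\n\n" ++ t) :: ts) := by
  apply String.ext
  rw [PySem.Str.toList_join, PySem.Str.toList_join]
  simp only [List.map_cons]
  rw [PySem.Chars.join_cons_cons]
  cases ts with
  | nil =>
    simp [PySem.Chars.join_singleton, String.toList_append, List.append_assoc]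
  | cons u us =>
    simp only [List.map_cons, PySem.Chars.join_cons_cons, String.toList_append]
    simp [List.append_assoc]

-- B's iterated merge equals A's single insert of the joined texts
theorem pvMergeAll_eq (ts : List String) :
    ∀ (m : List (String × String)) (c : String),
      pvGet? m "content" = some c → (m.map Prod.fst).Nodup →
      pvMergeAll m ts
        = ((PySem.Dict.mk m).insert "content" (PySem.Str.join "\n\n" (c :: ts))).items := by
  induction ts with
  | nil =>
    intro m c hget hnd
    have : PySem.Str.join "\n\n" [c] = c := by
      apply String.ext
      rw [PySem.Str.toList_join]
      simp [PySem.Chars.join_singleton]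
    rw [pvMergeAll, List.foldl_nil, this, pvInsert_same m _ c hget hnd]
  | cons t ts ih =>
    intro m c hget hnd
    have hgd : (PySem.Dict.mk m).getD "content" "" = c := by
      have := hget; simp only [pvGet?] at this
      simp [PySem.Dict.getD_eq_get?_getD, this]
    have h1 : pvMergeAll m (t :: ts)
        = pvMergeAll ((PySem.Dict.mk m).insert "content" (c ++ "\n\n" ++ t)).items ts := by
      simp [pvMergeAll, hgd]
    rw [h1, ih _ (c ++ "\n\n" ++ t)
      (by exact PySem.Dict.get?_insert_self _ _ _)
      (by
        have : (((PySem.Dict.mk m).insert "content" (c ++ "\n\n" ++ t)).items.map Prod.fst)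
            = ((PySem.Dict.mk m).insert "content" (c ++ "\n\n" ++ t)).keys := rfl
        rw [this]
        exact PySem.Dict.nodup_keys_insert _ _ _ hnd)]
    rw [← pvJoin_cons_cons]
    congr 1
    exact PySem.Dict.insert_insert_self _ _ _ _

-- Pre_ restricts to any suffix of the event list
theorem pvPre_suffix (events tl : List (List (String × String)))
    (hs : tl <:+ events) (hp : Pre_consolidate_agent_text events) :
    Pre_consolidate_agent_text tl := by
  obtain ⟨h1, h2, h3⟩ := hp
  exact ⟨fun e he => h1 e (hs.subset he), fun e he => h2 e (hs.subset he), h3.suffix hs⟩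

theorem pvMain : ∀ events : List (List (String × String)),
    Pre_consolidate_agent_text events →
    consolidate_agent_text events = (events.foldl pvStepB []).reverse := by
  intro events
  induction events using consolidate_agent_text.induct with
  | case1 => intro _; simp [consolidate_agent_text]
  | case2 ev tl hat r ih =>
    intro hp
    have h1 := hp.1
    have h2 := hp.2.1
    have htype : pvGet? ev "type" = some "agent_text" := by
      simpa [pvIsAT] using hat
    have hcont : (pvGet? ev "content").isSome := h2 ev List.mem_cons_self hat
    obtain ⟨c, hc⟩ := Option.isSome_iff_exists.mp hcont
    have hrun := pvFoldl_stepB_run tl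
      (fun e he hat' => h2 e (List.mem_cons_of_mem ev he) hat') ev ev htype rfl rfl
    have hrem : Pre_consolidate_agent_text (pvRunA ev tl).2 :=
      pvPre_suffix _ _ ((pvRunA_suffix ev tl).trans (List.suffix_cons ev tl)) hp
    simp only [consolidate_agent_text, hat, if_true]
    rw [ih hrem]
    simp only [List.foldl_cons]
    have hstep0 : pvStepB [] ev = [ev] := rfl
    rw [hstep0, hrun, List.reverse_append, List.reverse_singleton, List.singleton_append]
    congr 1
    · have hgd : (PySem.Dict.mk ev).getD "content" "" = c := by
        have := hc; simp only [pvGet?] at this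
        simp [PySem.Dict.getD_eq_get?_getD, this]
      rw [hgd, ← pvMergeAll_eq (pvRunA ev tl).1 ev c hc (h1 ev List.mem_cons_self).2]
  | case3 ev tl hat ih =>
    intro hp
    have htl : Pre_consolidate_agent_text tl :=
      pvPre_suffix _ _ (List.suffix_cons ev tl) hp
    simp only [consolidate_agent_text, hat]
    rw [ih htl]
    simp only [List.foldl_cons]
    have hstep0 : pvStepB [] ev = [ev] := rfl
    rw [hstep0, pvFoldl_stepB_push tl ev (by
      intro e tl' _
      have hf : pvIsAT ev = false := Bool.eq_false_iff.mpr hat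
      simp [pvCondB, hf])]
    simp

-- ===== VERDICT (by name: the statement is the Claim_ definition above) =====
theorem consolidate_agent_text_spec : Claim_equal_consolidate_agent_text := by
  intro events _ hp
  unfold Spec_consolidate_agent_text consolidate_agent_text_alt
  exact pvMain events hp
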